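-- pv_equiv track=rewrite | github.com/loadingsjy/algorithm | sliding_window/countKConstraintSubstrings.py | countKConstraintSubstrings2
-- ===== SOURCE A (Python) =====
-- def countKConstraintSubstrings2(s: str, k: int) -> int:
--     """灵神写法"""
--     ans = left = 0
--     cnt = [0, 0]
--     for i, c in enumerate(s):
--         cnt[ord(c) & 1] += 1
--         while cnt[0] > k and cnt[1] > k:
--             cnt[ord(s[left]) & 1] -= 1
--             left += 1
--         ans += i - left + 1
--     return ans
-- ===== SOURCE B (Python) =====
-- def countKConstraintSubstrings2(s: str, k: int) -> int:
--     # Prefix-count tables + binary search for the least valid left endpoint,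
--     # instead of an amortized sliding window.
--     n = len(s)
--     p0 = [0]
--     p1 = [0]
--     for c in s:
--         b = ord(c) & 1
--         p0.append(p0[-1] + 1 - b)
--         p1.append(p1[-1] + b)
--     ans = 0
--     for i in range(n):
--         # least l in [0, i+1) with NOT(p0[i+1]-p0[l] > k and p1[i+1]-p1[l] > k);
--         # the predicate is monotone in l, so binary search applies.
--         lo, hi = 0, i + 1
--         while lo < hi:
--             mid = (lo + hi) // 2
--             if p0[i + 1] - p0[mid] <= k or p1[i + 1] - p1[mid] <= k:
--                 hi = mid
--             else:
--                 lo = mid + 1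
--         ans += i + 1 - lo
--     return ans
-- ===== Notes on version B (the rewrite author's own statement) =====
-- stated objective: alternative
-- what changed: Replaces A's amortized sliding window with mutable running counters by precomputed prefix-count tables and, for each right endpoint, a binary search on the monotone validity predicate for the least valid left endpoint.
-- outside the precondition, e.g. on countKConstraintSubstrings2('a', -1): A raises IndexError, B returns 0
import Mathlib
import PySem

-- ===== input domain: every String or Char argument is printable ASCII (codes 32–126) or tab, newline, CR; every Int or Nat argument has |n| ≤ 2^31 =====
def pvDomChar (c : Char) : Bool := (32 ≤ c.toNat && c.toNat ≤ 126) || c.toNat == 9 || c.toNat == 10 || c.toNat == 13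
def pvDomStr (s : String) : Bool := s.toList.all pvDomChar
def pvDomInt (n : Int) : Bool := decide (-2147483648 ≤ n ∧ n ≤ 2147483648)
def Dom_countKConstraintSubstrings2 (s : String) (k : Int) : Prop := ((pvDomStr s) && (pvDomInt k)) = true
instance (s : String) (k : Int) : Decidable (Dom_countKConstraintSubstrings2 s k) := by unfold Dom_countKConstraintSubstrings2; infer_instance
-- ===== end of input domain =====

-- B replaces A's amortized sliding window by prefix-count tables plus a binary search for the
-- least valid left endpoint per right endpoint (objective: alternative algorithm, similar cost).

-- ===== PORT A =====
-- the two cells of Python's list 'cnt = [0, 0]' are carried as the two Ints c0, c1 (cnt = [c0, c1]).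
-- inner 'while cnt[0] > k and cnt[1] > k' loop; fuel only makes it total — Python raises
-- IndexError exactly where pyGet? is none (excluded by Pre_), and under Pre_ the fuel suffices.
def pvShrinkA (k : Int) (xs : List Char) : Nat → Nat → Int → Int → Nat × Int × Int
  | 0, left, c0, c1 => (left, c0, c1)
  | fuel+1, left, c0, c1 =>
    if c0 > k ∧ c1 > k then
      match PySem.List.pyGet? xs (left : Int) with
      | none => (left, c0, c1)        -- IndexError in Python; outside Pre_
      | some ch =>
        if ch.toNat &&& 1 = 0 then pvShrinkA k xs fuel (left+1) (c0-1) c1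
        else pvShrinkA k xs fuel (left+1) c0 (c1-1)
    else (left, c0, c1)

-- 'for i, c in enumerate(s)' with state (ans, left, cnt[0], cnt[1])
def pvLoopA (k : Int) (xs : List Char) : List (Int × Char) → Int × Nat × Int × Int → Int × Nat × Int × Int
  | [], st => st
  | (i, c) :: rest, (ans, left, c0, c1) =>
    let c0' := if c.toNat &&& 1 = 0 then c0 + 1 else c0   -- cnt[ord(c) & 1] += 1
    let c1' := if c.toNat &&& 1 = 0 then c1 else c1 + 1
    let r := pvShrinkA k xs (xs.length + 1) left c0' c1'
    pvLoopA k xs rest (ans + i - (r.1 : Int) + 1, r.1, r.2.1, r.2.2)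

def countKConstraintSubstrings2 (s : String) (k : Int) : Int :=
  (pvLoopA k s.toList (PySem.List.enumerate s.toList) (0, 0, 0, 0)).1

-- ===== PORT B =====
-- prefix tables: p0/p1 built by appending p@[-1] + (1-b) / p@[-1] + b
def pvPrefB (xs : List Char) : List Int × List Int :=
  xs.foldl (fun (p : List Int × List Int) c =>
    let b : Int := ((c.toNat &&& 1 : Nat) : Int)
    (p.1 ++ [PySem.List.pyGetD p.1 (-1) 0 + 1 - b], p.2 ++ [PySem.List.pyGetD p.2 (-1) 0 + b]))
    ([0], [0])

-- 'while lo < hi' binary search; fuel only makes it total (hi - lo shrinks every iteration,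
-- so initial fuel (i+1) is never exhausted)
def pvLB (p0 p1 : List Int) (k hiIdx : Int) : Nat → Int → Int → Int
  | 0, lo, _ => lo
  | fuel+1, lo, hi =>
    if lo < hi then
      let mid := PySem.Int.floordiv (lo + hi) 2
      if PySem.List.pyGetD p0 hiIdx 0 - PySem.List.pyGetD p0 mid 0 ≤ k ∨
         PySem.List.pyGetD p1 hiIdx 0 - PySem.List.pyGetD p1 mid 0 ≤ k
      then pvLB p0 p1 k hiIdx fuel lo mid
      else pvLB p0 p1 k hiIdx fuel (mid+1) hi
    else lo

def countKConstraintSubstrings2_alt (s : String) (k : Int) : Int :=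
  let xs := s.toList
  let n : Int := (xs.length : Int)
  let p := pvPrefB xs
  (PySem.List.pyRange 0 n 1).foldl (fun ans i =>
    let lo := pvLB p.1 p.2 k (i+1) (i+1).toNat 0 (i+1)
    ans + i + 1 - lo) 0

-- ===== PRECONDITION & SPEC =====
-- Pre_ excludes exactly the inputs where A raises IndexError: k < 0 with a nonempty string
-- (the shrink loop then never stops and runs off the end of s).
def Pre_countKConstraintSubstrings2 (s : String) (k : Int) : Prop := 0 ≤ k ∨ s = ""
instance (s : String) (k : Int) : Decidable (Pre_countKConstraintSubstrings2 s k) := by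
  unfold Pre_countKConstraintSubstrings2; infer_instance

def pvWitness_countKConstraintSubstrings2 : String × Int := ("ab0!", 1)

def Spec_countKConstraintSubstrings2 (s : String) (k : Int) (out : Int) : Prop := out = countKConstraintSubstrings2_alt s k
instance (s : String) (k : Int) (out : Int) : Decidable (Spec_countKConstraintSubstrings2 s k out) := by unfold Spec_countKConstraintSubstrings2; infer_instance

-- ===== CLAIM (what is proved, stated in full; the proofs are below) =====
def Claim_equal_countKConstraintSubstrings2 : Prop := ∀ (s : String) (k : Int), Dom_countKConstraintSubstrings2 s k → Pre_countKConstraintSubstrings2 s k → Spec_countKConstraintSubstrings2 s k (countKConstraintSubstrings2 s k)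

-- ===== LEMMAS AND PROOFS =====

-- number of chars of class 0 (resp. 1) among the first j chars
def pvQ0 (xs : List Char) (j : Nat) : Int := ((xs.take j).countP (fun c => c.toNat &&& 1 == 0) : Int)
def pvQ1 (xs : List Char) (j : Nat) : Int := ((xs.take j).countP (fun c => c.toNat &&& 1 == 1) : Int)

-- 'the window [l, i] is valid' (not both class counts exceed k)
def pvValB (xs : List Char) (k : Int) (i l : Nat) : Bool :=
  decide (pvQ0 xs (i+1) - pvQ0 xs l ≤ k) || decide (pvQ1 xs (i+1) - pvQ1 xs l ≤ k)

-- the least valid left endpoint for right endpoint i (= i+1 if none): since validity is upward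
-- closed in l, it equals the number of invalid l in [0, i]
def pvL (xs : List Char) (k : Int) (i : Nat) : Nat :=
  (List.range (i+1)).countP (fun l => !pvValB xs k i l)

-- the common reference value both programs compute
def pvF (xs : List Char) (k : Int) : Int :=
  ((List.range xs.length).map (fun t : Nat => ((t:Int) + 1 - (pvL xs k t : Int)))).sum

theorem pvQ0_mono (xs : List Char) {l m : Nat} (h : l ≤ m) : pvQ0 xs l ≤ pvQ0 xs m := by
  unfold pvQ0
  have := ((List.take_prefix_take_left (l := xs) h).sublist).countP_le (p := fun c : Char => c.toNat &&& 1 == 0)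
  exact_mod_cast this

theorem pvQ1_mono (xs : List Char) {l m : Nat} (h : l ≤ m) : pvQ1 xs l ≤ pvQ1 xs m := by
  unfold pvQ1
  have := ((List.take_prefix_take_left (l := xs) h).sublist).countP_le (p := fun c : Char => c.toNat &&& 1 == 1)
  exact_mod_cast this

theorem pvQ_succ (xs : List Char) {l : Nat} (h : l < xs.length) :
    pvQ0 xs (l+1) = pvQ0 xs l + (if xs[l].toNat &&& 1 = 0 then 1 else 0) ∧
    pvQ1 xs (l+1) = pvQ1 xs l + (if xs[l].toNat &&& 1 = 0 then 0 else 1) := by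
  unfold pvQ0 pvQ1
  rw [List.take_add_one, List.countP_append, List.countP_append]
  simp only [List.getElem?_eq_getElem h]
  by_cases hc : xs[l].toNat &&& 1 = 0
  · have h1 : xs[l].toNat &&& 1 ≠ 1 := by omega
    have h2 : xs[l].toNat % 2 = 0 := by
      have := Nat.and_one_is_mod xs[l].toNat; omega
    simp [hc, h2]
  · have h1 : xs[l].toNat &&& 1 < 2 := by
      have := Nat.and_le_right (n := xs[l].toNat) (m := 1); omega
    have h2 : xs[l].toNat &&& 1 = 1 := by omega
    have h3 : xs[l].toNat % 2 = 1 := by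
      have := Nat.and_one_is_mod xs[l].toNat; omega
    simp [h2, h3]

theorem pvQ_sum (xs : List Char) (j : Nat) :
    pvQ0 xs j + pvQ1 xs j = ((min j xs.length : Nat) : Int) := by
  unfold pvQ0 pvQ1
  have hlen := List.length_eq_countP_add_countP (l := xs.take j) (fun c => c.toNat &&& 1 == 0)
  have hcong : (xs.take j).countP (fun c => c.toNat &&& 1 == 1)
      = (xs.take j).countP (fun a => decide ¬((fun c => c.toNat &&& 1 == 0) a = true)) := by
    apply List.countP_congr
    intro c _
    have h1 : c.toNat &&& 1 < 2 := by
      have := Nat.and_le_right (n := c.toNat) (m := 1); omega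
    have hm := Nat.and_one_is_mod c.toNat
    interval_cases h : (c.toNat &&& 1) <;> simp <;> omega
  rw [hcong]
  rw [List.length_take] at hlen
  push_cast
  omega

theorem pvValB_mono (xs : List Char) (k : Int) (i : Nat) {l m : Nat} (h : l ≤ m)
    (hv : pvValB xs k i l = true) : pvValB xs k i m = true := by
  unfold pvValB at *
  have h0 := pvQ0_mono xs h
  have h1 := pvQ1_mono xs h
  simp only [Bool.or_eq_true, decide_eq_true_eq] at *
  omega

theorem pvValB_anti_i (xs : List Char) (k : Int) (i l : Nat)
    (hv : pvValB xs k i l = false) : pvValB xs k (i+1) l = false := by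
  unfold pvValB at *
  have h0 := pvQ0_mono xs (show i+1 ≤ i+1+1 by omega)
  have h1 := pvQ1_mono xs (show i+1 ≤ i+1+1 by omega)
  simp only [Bool.or_eq_false_iff, decide_eq_false_iff_not, not_le] at *
  omega

theorem pvValB_self (xs : List Char) {k : Int} (hk : 0 ≤ k) (i : Nat) :
    pvValB xs k i i = true := by
  unfold pvValB
  have h0 := pvQ0_mono xs (show i ≤ i+1 by omega)
  have h1 := pvQ1_mono xs (show i ≤ i+1 by omega)
  have hs1 := pvQ_sum xs (i+1)
  have hs0 := pvQ_sum xs i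
  simp only [Bool.or_eq_true, decide_eq_true_eq]
  have : ((min (i+1) xs.length : Nat) : Int) ≤ ((min i xs.length : Nat) : Int) + 1 := by
    push_cast; omega
  omega

theorem pvL_le (xs : List Char) (k : Int) (i : Nat) : pvL xs k i ≤ i + 1 := by
  unfold pvL
  have := List.countP_le_length (l := List.range (i+1)) (p := fun l => !pvValB xs k i l)
  simpa using this

theorem pvL_spec_lt (xs : List Char) (k : Int) (i : Nat) {j : Nat} (hj : j < pvL xs k i) :
    pvValB xs k i j = false := by
  by_contra hval
  rw [Bool.not_eq_false] at hval
  have hle : pvL xs k i ≤ j := by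
    rcases Nat.lt_or_ge j (i+1) with hj' | hj'
    · unfold pvL
      have hsplit : i + 1 = j + (i + 1 - j) := by omega
      rw [hsplit, List.range_add, List.countP_append]
      have hz : ((List.range (i+1-j)).map (j + ·)).countP (fun l => !pvValB xs k i l) = 0 := by
        rw [List.countP_eq_zero]
        intro a ha
        rcases List.mem_map.mp ha with ⟨d, _, rfl⟩
        simp [pvValB_mono xs k i (Nat.le_add_right j d) hval]
      have hb := List.countP_le_length (l := List.range j) (p := fun l => !pvValB xs k i l)
      simp only [List.length_range] at hb
      omega
    · exact le_trans (pvL_le xs k i) hj'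
  omega

theorem pvL_valid (xs : List Char) (k : Int) (i : Nat) (h : pvL xs k i < i + 1) :
    pvValB xs k i (pvL xs k i) = true := by
  by_contra hval
  rw [Bool.not_eq_true] at hval
  have hall : ∀ l ≤ pvL xs k i, pvValB xs k i l = false := by
    intro l hl
    by_contra h'
    rw [Bool.not_eq_false] at h'
    have := pvValB_mono xs k i hl h'
    rw [this] at hval; exact absurd hval (by simp)
  have : pvL xs k i + 1 ≤ pvL xs k i := by
    conv_rhs => unfold pvL
    have hsplit : i + 1 = (pvL xs k i + 1) + (i + 1 - (pvL xs k i + 1)) := by omega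
    rw [hsplit, List.range_add, List.countP_append]
    have hfull : (List.range (pvL xs k i + 1)).countP (fun l => !pvValB xs k i l)
        = pvL xs k i + 1 := by
      rw [List.countP_eq_length.mpr, List.length_range]
      intro a ha
      rw [List.mem_range] at ha
      simp [hall a (by omega)]
    omega
  omega

theorem pvL_le_i (xs : List Char) {k : Int} (hk : 0 ≤ k) (i : Nat) : pvL xs k i ≤ i := by
  by_contra h
  rw [not_le] at h
  have := pvL_spec_lt xs k i (j := i) h
  rw [pvValB_self xs hk i] at this
  exact absurd this (by simp)

theorem pvL_mono_i (xs : List Char) (k : Int) (i : Nat) : pvL xs k i ≤ pvL xs k (i+1) := by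
  by_contra h
  rw [not_le] at h
  have h1 : pvL xs k (i+1) < (i+1) + 1 := by
    have := pvL_le xs k i; omega
  have hv := pvL_valid xs k (i+1) h1
  have hnv := pvValB_anti_i xs k i _ (pvL_spec_lt xs k i h)
  rw [hv] at hnv
  exact absurd hnv (by simp)

theorem pvShrinkA_spec (xs : List Char) (k : Int) (i : Nat) :
    ∀ (fuel left : Nat), left ≤ pvL xs k i → i < xs.length → pvL xs k i ≤ i →
    i + 1 - left ≤ fuel →
    pvShrinkA k xs fuel left (pvQ0 xs (i+1) - pvQ0 xs left) (pvQ1 xs (i+1) - pvQ1 xs left)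
      = (pvL xs k i, pvQ0 xs (i+1) - pvQ0 xs (pvL xs k i), pvQ1 xs (i+1) - pvQ1 xs (pvL xs k i)) := by
  intro fuel
  induction fuel with
  | zero => intro left hle hi hLi hf; omega
  | succ f ih =>
    intro left hle hi hLi hf
    rcases Nat.eq_or_lt_of_le hle with heq | hlt
    · have hv := pvL_valid xs k i (by omega)
      rw [← heq] at hv
      have hcond : ¬(pvQ0 xs (i+1) - pvQ0 xs left > k ∧ pvQ1 xs (i+1) - pvQ1 xs left > k) := by
        unfold pvValB at hv
        simp only [Bool.or_eq_true, decide_eq_true_eq] at hv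
        omega
      rw [pvShrinkA, if_neg hcond, heq]
    · have hnv := pvL_spec_lt xs k i hlt
      have hcond : pvQ0 xs (i+1) - pvQ0 xs left > k ∧ pvQ1 xs (i+1) - pvQ1 xs left > k := by
        unfold pvValB at hnv
        simp only [Bool.or_eq_false_iff, decide_eq_false_iff_not, not_le] at hnv
        omega
      have hidx : left < xs.length := by omega
      have hq := pvQ_succ xs hidx
      rw [pvShrinkA, if_pos hcond, PySem.List.pyGet?_natCast, List.getElem?_eq_getElem hidx]
      dsimp only
      by_cases hc : xs[left].toNat &&& 1 = 0
      · rw [if_pos hc]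
        have e0 : pvQ0 xs (i+1) - pvQ0 xs left - 1 = pvQ0 xs (i+1) - pvQ0 xs (left+1) := by
          rw [hq.1, if_pos hc]; ring
        have e1 : pvQ1 xs (i+1) - pvQ1 xs left = pvQ1 xs (i+1) - pvQ1 xs (left+1) := by
          rw [hq.2, if_pos hc]; ring
        rw [e0, e1]
        exact ih (left+1) hlt hi hLi (by omega)
      · rw [if_neg hc]
        have e0 : pvQ0 xs (i+1) - pvQ0 xs left = pvQ0 xs (i+1) - pvQ0 xs (left+1) := by
          rw [hq.1, if_neg hc]; ring
        have e1 : pvQ1 xs (i+1) - pvQ1 xs left - 1 = pvQ1 xs (i+1) - pvQ1 xs (left+1) := by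
          rw [hq.2, if_neg hc]; ring
        rw [e0, e1]
        exact ih (left+1) hlt hi hLi (by omega)

theorem pvLoopA_spec (xs : List Char) {k : Int} (hk : 0 ≤ k) :
    ∀ (suf pre : List Char) (ans : Int) (left : Nat), xs = pre ++ suf →
    left ≤ pvL xs k pre.length →
    (pvLoopA k xs (PySem.List.enumerate suf (pre.length : Int))
      (ans, left, pvQ0 xs pre.length - pvQ0 xs left, pvQ1 xs pre.length - pvQ1 xs left)).1
    = ans + ((List.range suf.length).map
        (fun d => (((pre.length + d : Nat) : Int) + 1 - (pvL xs k (pre.length + d) : Int)))).sum := by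
  intro suf
  induction suf with
  | nil => intro pre ans left hxs hle; simp [PySem.List.enumerate_nil, pvLoopA]
  | cons c suf' ih =>
    intro pre ans left hxs hle
    have ht : pre.length < xs.length := by subst hxs; simp
    have hget : xs[pre.length]'ht = c := by
      subst hxs
      rw [List.getElem_append_right (le_refl pre.length)]
      simp
    have hq := pvQ_succ xs ht
    rw [hget] at hq
    have hLi := pvL_le_i xs hk pre.length
    rw [PySem.List.enumerate_cons, pvLoopA]
    have hup0 : (if c.toNat &&& 1 = 0 then pvQ0 xs pre.length - pvQ0 xs left + 1
        else pvQ0 xs pre.length - pvQ0 xs left) = pvQ0 xs (pre.length+1) - pvQ0 xs left := by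
      by_cases hc : c.toNat &&& 1 = 0
      · rw [if_pos hc, hq.1, if_pos hc]; ring
      · rw [if_neg hc, hq.1, if_neg hc]; ring
    have hup1 : (if c.toNat &&& 1 = 0 then pvQ1 xs pre.length - pvQ1 xs left
        else pvQ1 xs pre.length - pvQ1 xs left + 1) = pvQ1 xs (pre.length+1) - pvQ1 xs left := by
      by_cases hc : c.toNat &&& 1 = 0
      · rw [if_pos hc, hq.2, if_pos hc]; ring
      · rw [if_neg hc, hq.2, if_neg hc]; ring
    rw [hup0, hup1]
    rw [pvShrinkA_spec xs k pre.length (xs.length+1) left hle ht hLi (by omega)]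
    dsimp only
    have hpre' : ((pre ++ [c]).length : Nat) = pre.length + 1 := by simp
    have hxs' : xs = (pre ++ [c]) ++ suf' := by simp [hxs]
    have hle' : pvL xs k pre.length ≤ pvL xs k (pre ++ [c]).length := by
      rw [hpre']; exact pvL_mono_i xs k pre.length
    have hcast : ((pre.length : Int) + 1) = (((pre ++ [c]).length : Nat) : Int) := by
      rw [hpre']; push_cast; ring
    rw [hcast, show pre.length + 1 = (pre ++ [c]).length from hpre'.symm]
    rw [ih (pre ++ [c]) _ _ hxs' hle']
    rw [List.length_cons, List.range_succ_eq_map]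
    simp only [List.map_cons, List.map_map, List.sum_cons, hpre']
    have hmc : ∀ d ∈ List.range suf'.length,
        ((fun d => (((pre.length + 1 + d : Nat) : Int) + 1 - (pvL xs k (pre.length + 1 + d) : Int))) d)
        = ((fun d => (((pre.length + d : Nat) : Int) + 1 - (pvL xs k (pre.length + d) : Int))) ∘ Nat.succ) d := by
      intro d _
      simp only [Function.comp]
      rw [show pre.length + Nat.succ d = pre.length + 1 + d by omega]
    rw [List.map_congr_left hmc]
    simp only [Nat.add_zero]
    ring

theorem A_eq_F (s : String) {k : Int} (hk : 0 ≤ k) :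
    countKConstraintSubstrings2 s k = pvF s.toList k := by
  unfold countKConstraintSubstrings2 pvF
  have h := pvLoopA_spec s.toList hk s.toList [] 0 0 rfl (Nat.zero_le _)
  simp only [List.length_nil, Nat.cast_zero, pvQ0, pvQ1, List.take_zero,
    List.countP_nil, sub_self, zero_add] at h
  convert h using 2

theorem pvQ_last (ys : List Char) (c : Char) :
    pvQ0 (ys ++ [c]) (ys.length + 1) = pvQ0 ys ys.length + 1 - ((c.toNat &&& 1 : Nat) : Int) ∧
    pvQ1 (ys ++ [c]) (ys.length + 1) = pvQ1 ys ys.length + ((c.toNat &&& 1 : Nat) : Int) := by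
  have hb : c.toNat &&& 1 < 2 := by
    have := Nat.and_le_right (n := c.toNat) (m := 1); omega
  unfold pvQ0 pvQ1
  rw [List.take_of_length_le (by simp), List.take_of_length_le (by simp),
      List.countP_append, List.countP_append]
  constructor <;>
  · interval_cases h : (c.toNat &&& 1) <;>
    · simp only [List.countP_cons, List.countP_nil, h]
      push_cast
      simp

theorem pvQ_frozen (ys : List Char) (c : Char) {j : Nat} (hj : j ≤ ys.length) :
    pvQ0 (ys ++ [c]) j = pvQ0 ys j ∧ pvQ1 (ys ++ [c]) j = pvQ1 ys j := by
  unfold pvQ0 pvQ1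
  rw [List.take_append_of_le_length hj]
  exact ⟨rfl, rfl⟩

theorem pvPrefB_spec (xs : List Char) :
    pvPrefB xs = ((List.range (xs.length+1)).map (fun j => pvQ0 xs j),
                  (List.range (xs.length+1)).map (fun j => pvQ1 xs j)) := by
  induction xs using List.reverseRecOn with
  | nil => simp [pvPrefB, pvQ0, pvQ1, List.range_succ]
  | append_singleton ys c ihys =>
    unfold pvPrefB at ihys ⊢
    rw [List.foldl_append, ihys, List.foldl_cons, List.foldl_nil]
    have hpeel : List.range (ys.length + 1) = List.range ys.length ++ [ys.length] :=
      List.range_succ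
    have hlast0 : PySem.List.pyGetD ((List.range (ys.length+1)).map (fun j => pvQ0 ys j)) (-1) 0
        = pvQ0 ys ys.length := by
      rw [hpeel, List.map_append, List.map_cons, List.map_nil,
          PySem.List.pyGetD_neg_one_append_singleton]
    have hlast1 : PySem.List.pyGetD ((List.range (ys.length+1)).map (fun j => pvQ1 ys j)) (-1) 0
        = pvQ1 ys ys.length := by
      rw [hpeel, List.map_append, List.map_cons, List.map_nil,
          PySem.List.pyGetD_neg_one_append_singleton]
    dsimp only
    rw [hlast0, hlast1]
    have hmap0 : (List.range ((ys ++ [c]).length + 1)).map (fun j => pvQ0 (ys ++ [c]) j)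
        = (List.range (ys.length+1)).map (fun j => pvQ0 ys j)
          ++ [pvQ0 ys ys.length + 1 - ((c.toNat &&& 1 : Nat) : Int)] := by
      rw [List.length_append, List.length_cons, List.length_nil, List.range_succ,
          List.map_append, List.map_cons, List.map_nil]
      congr 1
      · apply List.map_congr_left
        intro j hj
        rw [List.mem_range] at hj
        exact (pvQ_frozen ys c (by omega)).1
      · rw [Nat.add_zero, (pvQ_last ys c).1]
    have hmap1 : (List.range ((ys ++ [c]).length + 1)).map (fun j => pvQ1 (ys ++ [c]) j)
        = (List.range (ys.length+1)).map (fun j => pvQ1 ys j)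
          ++ [pvQ1 ys ys.length + ((c.toNat &&& 1 : Nat) : Int)] := by
      rw [List.length_append, List.length_cons, List.length_nil, List.range_succ,
          List.map_append, List.map_cons, List.map_nil]
      congr 1
      · apply List.map_congr_left
        intro j hj
        rw [List.mem_range] at hj
        exact (pvQ_frozen ys c (by omega)).2
      · rw [Nat.add_zero, (pvQ_last ys c).2]
    rw [hmap0, hmap1]

theorem pvLB_exit (xs : List Char) (k : Int) (i : Nat) (lo : Int) (h0 : 0 ≤ lo)
    (hloi : lo ≤ (i:Int)+1)
    (hlow : ∀ j : Nat, (j:Int) < lo → pvValB xs k i j = false)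
    (hhigh : ∀ j : Nat, lo ≤ (j:Int) → j < i+1 → pvValB xs k i j = true) :
    lo = (pvL xs k i : Int) := by
  have hL := pvL_le xs k i
  have h1 : ¬ (pvL xs k i < lo.toNat) := by
    intro h
    have hv := pvL_valid xs k i (by omega)
    have := hlow (pvL xs k i) (by omega)
    rw [hv] at this; exact absurd this (by simp)
  have h2 : ¬ (lo.toNat < pvL xs k i) := by
    intro h
    have hnv := pvL_spec_lt xs k i h
    have := hhigh lo.toNat (by omega) (by omega)
    rw [this] at hnv; exact absurd hnv (by simp)
  omega

theorem pvLB_spec (xs : List Char) (k : Int) (i : Nat) (hi : i < xs.length) :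
    ∀ (fuel : Nat) (lo hi' : Int), 0 ≤ lo → lo ≤ hi' → hi' ≤ (i:Int)+1 →
    (∀ j : Nat, (j:Int) < lo → pvValB xs k i j = false) →
    (∀ j : Nat, hi' ≤ (j:Int) → j < i+1 → pvValB xs k i j = true) →
    (hi' - lo).toNat ≤ fuel →
    pvLB ((List.range (xs.length+1)).map (fun j => pvQ0 xs j))
         ((List.range (xs.length+1)).map (fun j => pvQ1 xs j)) k ((i:Int)+1) fuel lo hi'
      = (pvL xs k i : Int) := by
  intro fuel
  induction fuel with
  | zero =>
    intro lo hi' h0 hlh hhi hlow hhigh hf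
    rw [pvLB]
    exact pvLB_exit xs k i lo h0 (by omega) hlow (by intro j hj hji; exact hhigh j (by omega) hji)
  | succ f ih =>
    intro lo hi' h0 hlh hhi hlow hhigh hf
    rw [pvLB]
    by_cases hlohi : lo < hi'
    · rw [if_pos hlohi]
      have hmb := PySem.Int.floordiv_two_mid_bounds (lo := lo) (hi := hi') (by omega)
      have hmlt : PySem.Int.floordiv (lo + hi') 2 < hi' := by
        rw [PySem.Int.floordiv_lt_iff_lt_mul (by omega)]
        omega
      generalize hmidg : PySem.Int.floordiv (lo + hi') 2 = mid
      rw [hmidg] at hmb hmlt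
      show (if PySem.List.pyGetD ((List.range (xs.length+1)).map (fun j => pvQ0 xs j)) ((i:Int)+1) 0 - PySem.List.pyGetD ((List.range (xs.length+1)).map (fun j => pvQ0 xs j)) mid 0 ≤ k ∨
          PySem.List.pyGetD ((List.range (xs.length+1)).map (fun j => pvQ1 xs j)) ((i:Int)+1) 0 - PySem.List.pyGetD ((List.range (xs.length+1)).map (fun j => pvQ1 xs j)) mid 0 ≤ k then
          pvLB ((List.range (xs.length+1)).map (fun j => pvQ0 xs j)) ((List.range (xs.length+1)).map (fun j => pvQ1 xs j)) k ((i:Int) + 1) f lo mid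
        else
          pvLB ((List.range (xs.length+1)).map (fun j => pvQ0 xs j)) ((List.range (xs.length+1)).map (fun j => pvQ1 xs j)) k ((i:Int) + 1) f (mid + 1) hi') = ((pvL xs k i : Nat) : Int)
      have hmn : mid.toNat < xs.length + 1 := by omega
      have hin : i + 1 < xs.length + 1 := by omega
      have hg0i : PySem.List.pyGetD ((List.range (xs.length+1)).map (fun j => pvQ0 xs j)) ((i:Int)+1) 0 = pvQ0 xs (i+1) := by
        rw [show ((i:Int)+1) = ((i+1 : Nat) : Int) by push_cast; ring, PySem.List.pyGetD_natCast,
            PySem.List.getD_map_range _ _ _ _ hin]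
      have hg1i : PySem.List.pyGetD ((List.range (xs.length+1)).map (fun j => pvQ1 xs j)) ((i:Int)+1) 0 = pvQ1 xs (i+1) := by
        rw [show ((i:Int)+1) = ((i+1 : Nat) : Int) by push_cast; ring, PySem.List.pyGetD_natCast,
            PySem.List.getD_map_range _ _ _ _ hin]
      have hg0m : PySem.List.pyGetD ((List.range (xs.length+1)).map (fun j => pvQ0 xs j)) mid 0 = pvQ0 xs mid.toNat := by
        rw [show mid = ((mid.toNat : Nat) : Int) by omega, PySem.List.pyGetD_natCast,
            PySem.List.getD_map_range _ _ _ _ hmn]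
        rw [Int.toNat_natCast]
      have hg1m : PySem.List.pyGetD ((List.range (xs.length+1)).map (fun j => pvQ1 xs j)) mid 0 = pvQ1 xs mid.toNat := by
        rw [show mid = ((mid.toNat : Nat) : Int) by omega, PySem.List.pyGetD_natCast,
            PySem.List.getD_map_range _ _ _ _ hmn]
        rw [Int.toNat_natCast]
      rw [hg0i, hg1i, hg0m, hg1m]
      by_cases hv : pvValB xs k i mid.toNat = true
      · have hvp : pvQ0 xs (i+1) - pvQ0 xs mid.toNat ≤ k ∨ pvQ1 xs (i+1) - pvQ1 xs mid.toNat ≤ k := by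
          unfold pvValB at hv
          simp only [Bool.or_eq_true, decide_eq_true_eq] at hv
          exact hv
        rw [if_pos hvp]
        exact ih lo mid (by omega) (by omega) (by omega) hlow
          (by
            intro j hj hji
            exact pvValB_mono xs k i (show mid.toNat ≤ j by omega) hv)
          (by omega)
      · have hvp : ¬(pvQ0 xs (i+1) - pvQ0 xs mid.toNat ≤ k ∨ pvQ1 xs (i+1) - pvQ1 xs mid.toNat ≤ k) := by
          unfold pvValB at hv
          simp only [Bool.or_eq_true, decide_eq_true_eq] at hv
          exact hv
        rw [if_neg hvp]
        apply ih (mid+1) hi' (by omega) (by omega) hhi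
          (by
            intro j hj
            by_contra hjv
            rw [Bool.not_eq_false] at hjv
            rcases Nat.lt_or_ge j mid.toNat with hjm | hjm
            · have := pvValB_mono xs k i (show j ≤ mid.toNat by omega) hjv
              exact hv this
            · have hjlt : (j:Int) < lo ∨ j = mid.toNat := by omega
              rcases hjlt with hjl | rfl
              · have := hlow j hjl; rw [this] at hjv; exact absurd hjv (by simp)
              · exact hv hjv)
          hhigh (by omega)
    · rw [if_neg hlohi]
      exact pvLB_exit xs k i lo h0 (by omega)
        hlow (by intro j hj hji; exact hhigh j (by omega) hji)

theorem B_eq_F (s : String) (k : Int) :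
    countKConstraintSubstrings2_alt s k = pvF s.toList k := by
  show (PySem.List.pyRange 0 (s.toList.length : Int) 1).foldl
      (fun ans i => ans + i + 1 - pvLB (pvPrefB s.toList).1 (pvPrefB s.toList).2 k (i+1) (i+1).toNat 0 (i+1)) 0
    = ((List.range s.toList.length).map (fun t : Nat => ((t:Int) + 1 - (pvL s.toList k t : Int)))).sum
  rw [pvPrefB_spec]
  dsimp only
  have hcong : ∀ (ans i : Int), i ∈ PySem.List.pyRange 0 (s.toList.length : Int) 1 →
      (ans + i + 1 - pvLB ((List.range (s.toList.length+1)).map (fun j => pvQ0 s.toList j))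
        ((List.range (s.toList.length+1)).map (fun j => pvQ1 s.toList j)) k (i+1) (i+1).toNat 0 (i+1))
      = ans + (i + 1 - ((pvL s.toList k i.toNat : Nat) : Int)) := by
    intro ans i hmem
    rw [PySem.List.mem_pyRange_one] at hmem
    have hit : i.toNat < s.toList.length := by omega
    have hi1 : (i + 1) = ((i.toNat : Int) + 1) := by omega
    rw [hi1, pvLB_spec s.toList k i.toNat hit ((i.toNat : Int)+1).toNat 0 ((i.toNat : Int)+1)
      (le_refl 0) (by omega) (by omega)
      (by intro j hj; exact absurd hj (by omega))
      (by intro j hj1 hj2; exact absurd hj1 (by omega))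
      (by omega)]
    omega
  have h1 := PySem.List.foldl_congr_mem (PySem.List.pyRange 0 (s.toList.length : Int) 1) _
    (fun ans i => ans + (i + 1 - ((pvL s.toList k i.toNat : Nat) : Int))) 0 hcong
  rw [h1, PySem.List.foldl_add, PySem.List.pyRange_one]
  simp only [Int.sub_zero, Int.toNat_natCast, List.map_map, zero_add]
  apply congrArg List.sum
  apply List.map_congr_left
  intro t ht
  simp

-- ===== VERDICT (by name: the statement is the Claim_ definition above) =====
theorem countKConstraintSubstrings2_spec : Claim_equal_countKConstraintSubstrings2 := by
  intro s k _ hpre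
  unfold Spec_countKConstraintSubstrings2
  rcases hpre with hk | hempty
  · rw [A_eq_F s hk, B_eq_F]
  · subst hempty; rfl
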